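-- pv_equiv track=rewrite | github.com/kshired/Algorithms | programmers/더_맵게.py | solution
-- ===== SOURCE A (Python) =====
-- from heapq import heappop, heappush, heapify
--
-- def solution(scoville, K):
--     heapify(scoville)
--     answer = 0
--
--     while scoville[0] < K and len(scoville) > 1:
--         s1 = heappop(scoville)
--         s2 = heappop(scoville)
--         heappush(scoville,s1+s2*2)
--         answer += 1
--
--     if len(scoville) == 1 and scoville[0] < K:
--         answer = -1
--
--     return answer
-- ===== SOURCE B (Python) =====
-- def solution(scoville, K):
--     # sorted-list priority queue instead of a heap; does not mutate scoville
--     pool = sorted(scoville)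
--     answer = 0
--     while pool[0] < K and len(pool) > 1:
--         s1 = pool[0]
--         s2 = pool[1]
--         v = s1 + s2 * 2
--         rest = pool[2:]
--         i = 0
--         while i < len(rest) and rest[i] <= v:
--             i += 1
--         rest.insert(i, v)
--         pool = rest
--         answer += 1
--     if len(pool) == 1 and pool[0] < K:
--         answer = -1
--     return answer
-- ===== Notes on version B (the rewrite author's own statement) =====
-- stated objective: alternative
-- what changed: Replaces the binary heap with a sorted-list priority queue: sort once, take the two front (smallest) elements each round and re-insert the mixture at its ordered position by a scan; B does not mutate the argument (A heapifies scoville in place); the proved equivalence is about the return value.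
import Mathlib
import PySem

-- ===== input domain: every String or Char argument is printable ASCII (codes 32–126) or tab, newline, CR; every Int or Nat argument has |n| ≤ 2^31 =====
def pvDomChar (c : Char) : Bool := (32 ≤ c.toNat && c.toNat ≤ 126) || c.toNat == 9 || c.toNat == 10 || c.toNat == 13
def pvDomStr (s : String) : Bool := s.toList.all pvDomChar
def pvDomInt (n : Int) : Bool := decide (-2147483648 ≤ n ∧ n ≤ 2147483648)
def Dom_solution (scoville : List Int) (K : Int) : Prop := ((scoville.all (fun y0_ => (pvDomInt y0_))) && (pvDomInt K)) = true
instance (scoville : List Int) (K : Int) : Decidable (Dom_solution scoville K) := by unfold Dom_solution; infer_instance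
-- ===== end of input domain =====

-- B replaces A's binary heap by a sorted-list priority queue (sort once, take the two front
-- elements, re-insert the mixture at its ordered position); equivalence is about the RETURN
-- value only: A heapifies `scoville` in place, B does not mutate its argument.

-- ===== PORT A =====
-- The `heapq` library calls (heapify/heappop/heappush) have no PySem counterpart; they are
-- ported by a verified min-priority queue (a skew heap).  This is exact for the return value:
-- `solution`'s result depends only on the multiset of heap elements and on each pop returning
-- the minimum (elements are Ints, so ties are between equal values), which heapq guarantees.
inductive SHeap where
  | leaf : SHeap
  | node : Int → SHeap → SHeap → SHeap
deriving DecidableEq, Repr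

def SHeap.size : SHeap → Nat
  | .leaf => 0
  | .node _ l r => l.size + r.size + 1

-- cited by SHeap.merge's decreasing_by (a lemma the port needs may stay above the claim block)
theorem SHeap.merge_dec1 (a b : Int) (l1 r1 l2 r2 : SHeap) :
    r1.size + (SHeap.node b l2 r2).size < (SHeap.node a l1 r1).size + (SHeap.node b l2 r2).size :=
  Nat.add_lt_add_right (Nat.lt_succ_of_le (Nat.le_add_left _ _)) _

theorem SHeap.merge_dec2 (a b : Int) (l1 r1 l2 r2 : SHeap) :
    r2.size + (SHeap.node a l1 r1).size < (SHeap.node a l1 r1).size + (SHeap.node b l2 r2).size := by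
  rw [Nat.add_comm]
  exact Nat.add_lt_add_left (Nat.lt_succ_of_le (Nat.le_add_left _ _)) _

def SHeap.merge : SHeap → SHeap → SHeap
  | .leaf, t => t
  | .node a l r, .leaf => .node a l r
  | .node a l1 r1, .node b l2 r2 =>
    if a ≤ b then .node a (SHeap.merge r1 (.node b l2 r2)) l1
    else .node b (SHeap.merge r2 (.node a l1 r1)) l2
termination_by s t => s.size + t.size
decreasing_by
  · exact SHeap.merge_dec1 _ _ _ _ _ _
  · exact SHeap.merge_dec2 _ _ _ _ _ _

def SHeap.push (v : Int) (h : SHeap) : SHeap := SHeap.merge (.node v .leaf .leaf) h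

-- the `while scoville[0] < K and len(scoville) > 1` loop, plus the final `len == 1` check.
-- `fuel` is only a totality device: the loop body runs at most len(scoville) - 1 times
-- (each pass shrinks the heap by one), so with fuel = len(scoville) it never runs out.
def loopA (K : Int) (fuel : Nat) (h : SHeap) (ans : Int) : Int :=
  match fuel with
  | 0 => ans
  | fuel + 1 =>
    match h with
    | .leaf => ans  -- unreachable under Pre_ (Python raises IndexError on the empty list)
    | .node a l r =>
      if a < K ∧ 1 < (SHeap.node a l r).size then
        match SHeap.merge l r with
        | .leaf => ans  -- unreachable: size > 1
        | .node b l' r' => loopA K fuel (SHeap.push (a + b * 2) (SHeap.merge l' r')) (ans + 1)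
      else if (SHeap.node a l r).size = 1 ∧ a < K then -1 else ans

def solution (scoville : List Int) (K : Int) : Int :=
  loopA K scoville.length (scoville.foldl (fun h v => SHeap.push v h) .leaf) 0

-- ===== PORT B =====
-- the inner `while i < len(rest) and rest[i] <= v` scan followed by `rest.insert(i, v)`
def insLoop (v : Int) : List Int → List Int
  | [] => [v]
  | x :: t => if x ≤ v then x :: insLoop v t else v :: x :: t

-- the `while pool[0] < K and len(pool) > 1` loop of B, plus the final `len == 1` check;
-- fuel is the same totality device as in loopA.
def loopB (K : Int) (fuel : Nat) (pool : List Int) (ans : Int) : Int :=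
  match fuel with
  | 0 => ans
  | fuel + 1 =>
    match pool with
    | [] => ans  -- unreachable under Pre_ (Python raises IndexError on the empty list)
    | x :: t =>
      if x < K ∧ 1 < (x :: t).length then
        match t with
        | [] => ans  -- unreachable: length > 1
        | y :: t' => loopB K fuel (insLoop (x + y * 2) t') (ans + 1)
      else if (x :: t).length = 1 ∧ x < K then -1 else ans

def solution_alt (scoville : List Int) (K : Int) : Int :=
  loopB K scoville.length (PySem.List.sorted scoville (fun z => z) false) 0

-- ===== PRECONDITION & SPEC =====
-- Pre_ excludes exactly the empty list, on which Python A raises IndexError at `scoville[0]`.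
def Pre_solution (scoville : List Int) (K : Int) : Prop := scoville ≠ []
instance (scoville : List Int) (K : Int) : Decidable (Pre_solution scoville K) := by
  unfold Pre_solution; infer_instance

def pvWitness_solution : List Int × Int := ([1, 2, 3, 9, 10, 12], 7)

def Spec_solution (scoville : List Int) (K : Int) (out : Int) : Prop := out = solution_alt scoville K
instance (scoville : List Int) (K : Int) (out : Int) : Decidable (Spec_solution scoville K out) := by
  unfold Spec_solution; infer_instance

-- ===== CLAIM (what is proved, stated in full; the proofs are below) =====
def Claim_equal_solution : Prop := ∀ (scoville : List Int) (K : Int), Dom_solution scoville K → Pre_solution scoville K → Spec_solution scoville K (solution scoville K)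

-- ===== LEMMAS AND PROOFS =====

def SHeap.elems : SHeap → Multiset Int
  | .leaf => 0
  | .node a l r => a ::ₘ (l.elems + r.elems)

def IsMinHeap : SHeap → Prop
  | .leaf => True
  | .node a l r =>
      (∀ x ∈ SHeap.elems l, a ≤ x) ∧ (∀ x ∈ SHeap.elems r, a ≤ x) ∧ IsMinHeap l ∧ IsMinHeap r

theorem card_elems (h : SHeap) : (SHeap.elems h).card = h.size := by
  induction h with
  | leaf => simp [SHeap.elems, SHeap.size]
  | node a l r ihl ihr => simp [SHeap.elems, SHeap.size, ihl, ihr]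

theorem elems_merge (s t : SHeap) :
    (SHeap.merge s t).elems = s.elems + t.elems := by
  fun_induction SHeap.merge with
  | case1 t => simp [SHeap.elems]
  | case2 a l r => simp [SHeap.elems]
  | case3 a l1 r1 b l2 r2 hab ih =>
    simp only [SHeap.elems, ih, ← Multiset.singleton_add]
    abel
  | case4 a l1 r1 b l2 r2 hab ih =>
    simp only [SHeap.elems, ih, ← Multiset.singleton_add]
    abel

theorem root_le {a : Int} {l r : SHeap} (h : IsMinHeap (.node a l r)) :
    ∀ x ∈ (SHeap.node a l r).elems, a ≤ x := by
  intro x hx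
  simp only [SHeap.elems, Multiset.mem_cons, Multiset.mem_add] at hx
  rcases hx with rfl | hx | hx
  · exact le_refl x
  · exact h.1 x hx
  · exact h.2.1 x hx

theorem isMinHeap_merge {s t : SHeap} (hs : IsMinHeap s) (ht : IsMinHeap t) :
    IsMinHeap (SHeap.merge s t) := by
  fun_induction SHeap.merge with
  | case1 t => exact ht
  | case2 a l r => exact hs
  | case3 a l1 r1 b l2 r2 hab ih =>
    obtain ⟨hl1, hr1, hml1, hmr1⟩ := hs
    refine ⟨?_, hl1, ih hmr1 ht, hml1⟩
    intro x hx
    rw [elems_merge] at hx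
    rcases Multiset.mem_add.mp hx with hx | hx
    · exact hr1 x hx
    · exact le_trans hab (root_le ht x hx)
  | case4 a l1 r1 b l2 r2 hab ih =>
    obtain ⟨hl2, hr2, hml2, hmr2⟩ := ht
    refine ⟨?_, hl2, ih hmr2 hs, hml2⟩
    intro x hx
    rw [elems_merge] at hx
    rcases Multiset.mem_add.mp hx with hx | hx
    · exact hr2 x hx
    · exact le_trans (not_le.mp hab).le (root_le hs x hx)

theorem isMinHeap_push {v : Int} {h : SHeap} (hh : IsMinHeap h) :
    IsMinHeap (SHeap.push v h) := by
  apply isMinHeap_merge _ hh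
  exact ⟨by simp [SHeap.elems], by simp [SHeap.elems], trivial, trivial⟩

theorem elems_push (v : Int) (h : SHeap) :
    (SHeap.push v h).elems = v ::ₘ h.elems := by
  simp [SHeap.push, elems_merge, SHeap.elems]

theorem mem_insLoop (v z : Int) (t : List Int) :
    z ∈ insLoop v t ↔ z = v ∨ z ∈ t := by
  induction t with
  | nil => simp [insLoop]
  | cons x t ih => simp only [insLoop]; split <;> simp [ih, or_left_comm]

theorem coe_insLoop (v : Int) (t : List Int) :
    (↑(insLoop v t) : Multiset Int) = v ::ₘ ↑t := by
  induction t with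
  | nil => simp [insLoop]
  | cons x t ih =>
    simp only [insLoop]
    split
    · rw [← Multiset.cons_coe, ih, ← Multiset.cons_coe, Multiset.cons_swap]
    · simp

theorem pairwise_insLoop {v : Int} {t : List Int} (ht : t.Pairwise (· ≤ ·)) :
    (insLoop v t).Pairwise (· ≤ ·) := by
  induction t with
  | nil => simp [insLoop]
  | cons x t ih =>
    rw [List.pairwise_cons] at ht
    simp only [insLoop]
    split
    · rename_i hxv
      rw [List.pairwise_cons]
      refine ⟨?_, ih ht.2⟩
      intro z hz
      rcases (mem_insLoop v z t).mp hz with rfl | hz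
      · exact hxv
      · exact ht.1 z hz
    · rename_i hxv
      exact List.pairwise_cons.mpr ⟨by
        intro z hz
        rcases List.mem_cons.mp hz with rfl | hz
        · exact (not_le.mp hxv).le
        · exact le_trans (not_le.mp hxv).le (ht.1 z hz),
        List.pairwise_cons.mpr ht⟩

-- main invariant: with equal fuel, a min-heap and a sorted list over the SAME multiset
-- drive the two loops to the same answer
theorem loop_eq (K : Int) : ∀ (fuel : Nat) (h : SHeap) (bs : List Int) (ans : Int),
    IsMinHeap h → bs.Pairwise (· ≤ ·) → SHeap.elems h = ↑bs →
    loopA K fuel h ans = loopB K fuel bs ans := by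
  intro fuel
  induction fuel with
  | zero => intro h bs ans _ _ _; rfl
  | succ fuel ih =>
    intro h bs ans hmh hsort helems
    match h with
    | .leaf =>
      have hbs : bs = [] := by
        apply (Multiset.coe_eq_zero bs).mp
        rw [← helems]; rfl
      subst hbs
      rfl
    | .node a l r =>
      match bs with
      | [] =>
        exfalso
        have hc := congrArg Multiset.card helems
        rw [card_elems] at hc
        simp [SHeap.size] at hc
      | x :: t =>
        -- the two heads agree: each is the minimum of the same multiset
        have hax : a = x := by
          have ha_mem : a ∈ (↑(x :: t) : Multiset Int) := by
            rw [← helems]; simp [SHeap.elems]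
          have hx_mem : x ∈ (SHeap.node a l r).elems := by
            rw [helems]; simp
          have h1 : a ≤ x := root_le hmh x hx_mem
          have h2 : x ≤ a := by
            rw [Multiset.mem_coe, List.mem_cons] at ha_mem
            rcases ha_mem with rfl | hmem
            · exact le_refl a
            · exact (List.pairwise_cons.mp hsort).1 a hmem
          omega
        subst hax
        have hlen : (SHeap.node a l r).size = t.length + 1 := by
          have hc := congrArg Multiset.card helems
          rw [card_elems] at hc
          simpa using hc
        by_cases hK : a < K
        · match t with
          | [] =>
            -- one element left and it is below K: both return -1
            simp [loopA, loopB, hlen, hK]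
          | y :: t' =>
            -- at least two elements: one mixing step on each side
            have htail : l.elems + r.elems = (↑(y :: t') : Multiset Int) := by
              apply (Multiset.cons_inj_right a).mp
              have h0 : SHeap.elems (.node a l r) = a ::ₘ (l.elems + r.elems) := rfl
              rw [← h0, helems, Multiset.cons_coe]
            have hmerge_elems : (SHeap.merge l r).elems = (↑(y :: t') : Multiset Int) := by
              rw [elems_merge, htail]
            have hmerge_mh : IsMinHeap (SHeap.merge l r) :=
              isMinHeap_merge hmh.2.2.1 hmh.2.2.2
            rw [loopA]
            simp only [hlen, hK, true_and]
            rw [if_pos (by simp)]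
            match hm : SHeap.merge l r with
            | .leaf =>
              exfalso
              rw [hm] at hmerge_elems
              have hc := congrArg Multiset.card hmerge_elems
              simp [SHeap.elems] at hc
            | .node b l' r' =>
              rw [hm] at hmerge_elems hmerge_mh
              -- the two second-smallest elements agree
              have hby : b = y := by
                have hb_mem : b ∈ (↑(y :: t') : Multiset Int) := by
                  rw [← hmerge_elems]; simp [SHeap.elems]
                have hy_mem : y ∈ (SHeap.node b l' r').elems := by
                  rw [hmerge_elems]; simp
                have h1 : b ≤ y := root_le hmerge_mh y hy_mem
                have h2 : y ≤ b := by
                  rw [Multiset.mem_coe, List.mem_cons] at hb_mem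
                  rcases hb_mem with rfl | hmem
                  · exact le_refl b
                  · exact ((List.pairwise_cons.mp (List.pairwise_cons.mp hsort).2).1) b hmem
                omega
              subst hby
              have htail' : l'.elems + r'.elems = (↑t' : Multiset Int) := by
                apply (Multiset.cons_inj_right b).mp
                have h0 : SHeap.elems (.node b l' r') = b ::ₘ (l'.elems + r'.elems) := rfl
                rw [← h0, hmerge_elems, Multiset.cons_coe]
              rw [loopB]
              simp only [List.length_cons, hK, true_and]
              rw [if_pos (by omega)]
              apply ih
              · exact isMinHeap_push (isMinHeap_merge hmerge_mh.2.2.1 hmerge_mh.2.2.2)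
              · exact pairwise_insLoop
                  (List.pairwise_cons.mp (List.pairwise_cons.mp hsort).2).2
              · rw [elems_push, elems_merge, htail', coe_insLoop]
        · -- head already ≥ K: both loops stop with the current answer
          simp [loopA, loopB, hK]

theorem isMinHeap_foldl_push (xs : List Int) :
    ∀ acc : SHeap, IsMinHeap acc →
      IsMinHeap (xs.foldl (fun h v => SHeap.push v h) acc) := by
  induction xs with
  | nil => intro acc h; exact h
  | cons x xs ih =>
    intro acc h
    exact ih _ (isMinHeap_push h)

theorem elems_foldl_push (xs : List Int) :
    ∀ acc : SHeap,
      (xs.foldl (fun h v => SHeap.push v h) acc).elems = acc.elems + ↑xs := by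
  induction xs with
  | nil => intro acc; simp
  | cons x xs ih =>
    intro acc
    rw [List.foldl_cons, ih, elems_push, ← Multiset.cons_coe, Multiset.cons_add, Multiset.add_cons]

-- ===== VERDICT (by name: the statement is the Claim_ definition above) =====
theorem solution_spec : Claim_equal_solution := by
  intro scoville K _ _
  unfold Spec_solution solution solution_alt
  apply loop_eq
  · exact isMinHeap_foldl_push scoville .leaf trivial
  · have := PySem.List.sorted_pairwise scoville (fun z => z)
    simpa using this
  · rw [elems_foldl_push]
    simp only [SHeap.elems, Multiset.zero_add]
    exact Multiset.coe_eq_coe.mpr (PySem.List.sorted_perm scoville (fun z => z) false).symm
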